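-- pv_equiv track=rewrite | github.com/kdg391/fashion_backend | result.py | calc_total
-- ===== SOURCE A (Python) =====
-- def calc_total(operations):
--     total_main = 0
--     total_sub = 0
--     dep = 0
--
--     for val in operations:
--         if val[-1] == '+':
--             increase = 1
--         else:
--             increase = -1
--
--         if val[0] == 'm':
--             total_main += increase
--         elif val[0] == 's':
--             total_sub += increase
--         else:
--             dep += 1
--
--     return total_main, total_sub, dep
-- ===== SOURCE B (Python) =====
-- def calc_total(operations):
--     total_main = sum(1 if op[-1] == '+' else -1 for op in operations if op[0] == 'm')
--     total_sub = sum(1 if op[-1] == '+' else -1 for op in operations if op[0] == 's')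
--     dep = sum(1 for op in operations if op[0] not in ('m', 's'))
--     return total_main, total_sub, dep
-- ===== Notes on version B (the rewrite author's own statement) =====
-- stated objective: alternative
-- what changed: Replaces the single accumulator loop carrying three counters with three independent filtered passes (filter by first character, sum the +/- weights for 'm' and 's', count the rest).
import Mathlib
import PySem

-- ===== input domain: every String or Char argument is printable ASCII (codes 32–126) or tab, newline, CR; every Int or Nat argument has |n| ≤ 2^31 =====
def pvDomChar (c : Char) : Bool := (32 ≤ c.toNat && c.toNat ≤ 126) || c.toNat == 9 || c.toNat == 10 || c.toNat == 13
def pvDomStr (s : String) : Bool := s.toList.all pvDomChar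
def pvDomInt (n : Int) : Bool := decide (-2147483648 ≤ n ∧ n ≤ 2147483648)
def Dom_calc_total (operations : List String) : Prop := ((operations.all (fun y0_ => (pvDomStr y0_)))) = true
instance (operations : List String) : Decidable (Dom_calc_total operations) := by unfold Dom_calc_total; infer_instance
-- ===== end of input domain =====

-- B replaces A's single three-counter accumulator loop by three independent filtered passes; same cost ("alternative").
-- Both programs raise IndexError on an empty-string element, so Pre_ excludes those inputs.

-- ===== PORT A =====
-- val[-1] / val[0]: PySem.Str.pyGet?, none = IndexError; Pre_ guarantees nonempty strings,
-- so the .getD ' ' defaults are never reached on admitted inputs.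
def pvStepA (s : Int × Int × Int) (val : String) : Int × Int × Int :=
  let increase : Int := if (PySem.Str.pyGet? val (-1)).getD ' ' = '+' then 1 else -1
  let h := (PySem.Str.pyGet? val 0).getD ' '
  if h = 'm' then (s.1 + increase, s.2.1, s.2.2)
  else if h = 's' then (s.1, s.2.1 + increase, s.2.2)
  else (s.1, s.2.1, s.2.2 + 1)

def calc_total (operations : List String) : Int × Int × Int :=
  operations.foldl pvStepA (0, 0, 0)

-- ===== PORT B =====
def pvHead0 (v : String) : Char := (PySem.Str.pyGet? v 0).getD ' '
def pvInc (v : String) : Int := if (PySem.Str.pyGet? v (-1)).getD ' ' = '+' then 1 else -1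

def calc_total_alt (operations : List String) : Int × Int × Int :=
  (((operations.filter (fun op => pvHead0 op = 'm')).map pvInc).sum,
   ((operations.filter (fun op => pvHead0 op = 's')).map pvInc).sum,
   ((operations.filter (fun op => ¬ (pvHead0 op = 'm' ∨ pvHead0 op = 's'))).map (fun _ => (1 : Int))).sum)

-- ===== PRECONDITION & SPEC =====
-- Pre_ excludes lists containing an empty string, on which Python A raises IndexError (val[-1]).
def Pre_calc_total (operations : List String) : Prop := ∀ v ∈ operations, v ≠ ""
instance (operations : List String) : Decidable (Pre_calc_total operations) := by unfold Pre_calc_total; infer_instance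
def pvWitness_calc_total : List String := ["main+", "sub-", "dep"]

def Spec_calc_total (operations : List String) (out : Int × Int × Int) : Prop := out = calc_total_alt operations
instance (operations : List String) (out : Int × Int × Int) : Decidable (Spec_calc_total operations out) := by unfold Spec_calc_total; infer_instance

-- ===== CLAIM (what is proved, stated in full; the proofs are below) =====
def Claim_equal_calc_total : Prop := ∀ (operations : List String), Dom_calc_total operations → Pre_calc_total operations → Spec_calc_total operations (calc_total operations)

-- ===== LEMMAS AND PROOFS =====
lemma pvStepA_eq (v : String) (a b c : Int) :
    pvStepA (a, b, c) v =
      if pvHead0 v = 'm' then (a + pvInc v, b, c)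
      else if pvHead0 v = 's' then (a, b + pvInc v, c)
      else (a, b, c + 1) := rfl

lemma calc_total_loop (operations : List String) (a b c : Int) :
    operations.foldl pvStepA (a, b, c)
    = (a + ((operations.filter (fun op => pvHead0 op = 'm')).map pvInc).sum,
       b + ((operations.filter (fun op => pvHead0 op = 's')).map pvInc).sum,
       c + ((operations.filter (fun op => ¬ (pvHead0 op = 'm' ∨ pvHead0 op = 's'))).map (fun _ => (1 : Int))).sum) := by
  induction operations generalizing a b c with
  | nil => simp
  | cons v vs ih =>
    rw [List.foldl_cons, pvStepA_eq]
    split_ifs with hm hs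
    · simp [hm, ih, add_assoc]
    · simp [hs, ih, add_assoc]
    · simp [hm, hs, ih, add_assoc]

-- ===== VERDICT (by name: the statement is the Claim_ definition above) =====
theorem calc_total_spec : Claim_equal_calc_total := by
  intro operations _ _
  unfold Spec_calc_total calc_total calc_total_alt
  simp only [calc_total_loop, zero_add]
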